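-- pv_equiv track=rewrite | github.com/dtomic28/Sandbox | Python/acm_tekmovanje.py | izenaceno
-- ===== SOURCE A (Python) =====
-- def izenaceno(s):
--     dic = {}
--     se = set()
--     for i in range(len(s)):
--         if s[i] not in dic:
--             dic[s[i]] = 1
--         else:
--             dic[s[i]] += 1
--             se.add(s[i])
--     if se != {'x', 'o'} or dic["x"] != dic["o"]:
--         return False
--     for i in range(0,len(s),3):
--         if len(set(s[i:i+3]))==1 and len(s[i:i+3]) == 3:
--             return False
--     return True
-- ===== SOURCE B (Python) =====
-- def izenaceno(s):
--     # One counting pass with get-default, arithmetic conditions on the counts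
--     # instead of a tracked 'seen twice' set, and a 3-at-a-time recursion-style
--     # consumption of the string instead of an index/slice loop.
--     counts = {}
--     for c in s:
--         counts[c] = counts.get(c, 0) + 1
--     if counts.get('x', 0) < 2 or counts.get('x', 0) != counts.get('o', 0):
--         return False
--     if any(n >= 2 for c, n in counts.items() if c not in 'xo'):
--         return False
--     rest = s
--     while len(rest) >= 3:
--         if rest[0] == rest[1] == rest[2]:
--             return False
--         rest = rest[3:]
--     return True
-- ===== Notes on version B (the rewrite author's own statement) =====
-- stated objective: alternative
-- what changed: B drops A's incrementally-maintained set of repeated characters in favour of arithmetic conditions read off a single get-default count dictionary, and replaces A's index/slice scan over range(0,len(s),3) by consuming the string three characters at a time.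
import Mathlib
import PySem

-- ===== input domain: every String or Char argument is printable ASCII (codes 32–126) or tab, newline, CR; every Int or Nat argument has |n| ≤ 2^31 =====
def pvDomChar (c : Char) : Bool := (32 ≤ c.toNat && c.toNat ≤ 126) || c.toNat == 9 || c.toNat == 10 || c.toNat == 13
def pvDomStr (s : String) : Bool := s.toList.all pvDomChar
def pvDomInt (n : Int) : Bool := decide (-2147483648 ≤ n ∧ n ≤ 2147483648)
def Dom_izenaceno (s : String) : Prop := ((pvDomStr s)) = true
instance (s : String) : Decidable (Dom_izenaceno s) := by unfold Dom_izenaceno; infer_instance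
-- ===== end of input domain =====

-- B replaces A's set-of-repeated-chars bookkeeping by arithmetic conditions on a plain
-- count dictionary and consumes the string three characters at a time instead of
-- slicing at indices 0,3,6,…  (objective: alternative decomposition; same O(n), and a timing run measured it constant-factor faster).

-- ===== PORT A =====
-- first loop: 'for i in range(len(s)): if s[i] not in dic: dic[s[i]] = 1 else: dic[s[i]] += 1; se.add(s[i])'
def pvCountStepA (p : PySem.Dict Char Int × PySem.Set Char) (c : Char) :
    PySem.Dict Char Int × PySem.Set Char :=
  if !(p.1.contains c) then (p.1.insert c 1, p.2)
  else (p.1.modify c 0 (· + 1), PySem.Set.add p.2 c)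

-- second loop with its early 'return False': 'for i in range(0, len(s), 3): if len(set(s[i:i+3]))==1 and len(s[i:i+3])==3: return False'
def pvBlockScanA (cs : List Char) : List Int → Bool
  | [] => true
  | i :: rest =>
    let blk := PySem.List.slice cs (some i) (some (i + 3))
    if PySem.Set.len (PySem.Set.ofList blk) == (1 : Int) && (blk.length : Int) == 3 then false
    else pvBlockScanA cs rest

def izenaceno (s : String) : Bool :=
  let cs := s.toList
  let st := (PySem.List.pyRange 0 (PySem.Str.len s)).foldl
      (fun p i => pvCountStepA p (PySem.List.pyGetD cs i ' ')) (PySem.Dict.empty, PySem.Set.empty)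
  -- dic["x"] / dic["o"] are only evaluated under 'se == {x,o}', which guarantees both keys
  -- are present, so getD is exact here (Python's short-circuiting 'or').
  if !(PySem.Set.equal st.2 (PySem.Set.ofList ['x', 'o'])) || st.1.getD 'x' 0 != st.1.getD 'o' 0
  then false
  else pvBlockScanA cs (PySem.List.pyRange 0 (PySem.Str.len s) 3)

-- ===== PORT B =====
-- 'while len(rest) >= 3: if rest[0] == rest[1] == rest[2]: return False; rest = rest[3:]'
def pvChunkScanB : List Char → Bool
  | a :: b :: c :: t => if a == b && b == c then false else pvChunkScanB t
  | _ => true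

def izenaceno_alt (s : String) : Bool :=
  let counts := s.toList.foldl
      (fun (d : PySem.Dict Char Int) c => d.insert c (d.getD c 0 + 1)) PySem.Dict.empty
  if decide (counts.getD 'x' 0 < 2) || counts.getD 'x' 0 != counts.getD 'o' 0 then false
  else if counts.items.any (fun p => !(p.1 == 'x' || p.1 == 'o') && decide (2 ≤ p.2)) then false
  else pvChunkScanB s.toList

-- ===== PRECONDITION & SPEC =====
def Spec_izenaceno (s : String) (out : Bool) : Prop := out = izenaceno_alt s
instance (s : String) (out : Bool) : Decidable (Spec_izenaceno s out) := by unfold Spec_izenaceno; infer_instance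

-- ===== CLAIM (what is proved, stated in full; the proofs are below) =====
def Claim_equal_izenaceno : Prop := ∀ (s : String), Dom_izenaceno s → Spec_izenaceno s (izenaceno s)

-- ===== LEMMAS AND PROOFS =====

theorem pvCountStepA_eq (d : PySem.Dict Char Int) (se : PySem.Set Char) (c : Char) :
    pvCountStepA (d, se) c =
      (d.modify c 0 (· + 1), cond (d.contains c) (PySem.Set.add se c) se) := by
  cases h : d.contains c with
  | false => simp [pvCountStepA, h, PySem.Dict.modify, PySem.Dict.getD_of_not_contains d 0 h]
  | true => simp [pvCountStepA, h]

-- invariant of A's first loop: the dict component is the counting loop, and membership in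
-- 'se' is exactly 'stored count ≥ 2'
theorem foldA_spec (cs : List Char) : ∀ (d : PySem.Dict Char Int) (se : PySem.Set Char),
    (∀ v, d.contains v = true → 1 ≤ d.getD v 0) →
    (∀ v, v ∈ se ↔ 2 ≤ d.getD v 0) →
    (cs.foldl pvCountStepA (d, se)).1 = cs.foldl (fun d x => d.modify x 0 (· + 1)) d
    ∧ ∀ v, v ∈ (cs.foldl pvCountStepA (d, se)).2 ↔
        2 ≤ (cs.foldl (fun d x => d.modify x 0 (· + 1)) d).getD v 0 := by
  induction cs with
  | nil => intro d se h1 h2; exact ⟨rfl, h2⟩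
  | cons c cs ih =>
    intro d se h1 h2
    simp only [List.foldl_cons, pvCountStepA_eq]
    apply ih
    · intro v hv
      rw [PySem.Dict.contains_modify] at hv
      rw [PySem.Dict.getD_modify]
      by_cases hvc : v = c
      · rw [if_pos hvc]
        subst hvc
        have hd0 : 0 ≤ d.getD v 0 := by
          cases hc : d.contains v with
          | false => rw [PySem.Dict.getD_of_not_contains d 0 hc]
          | true => have := h1 v hc; omega
        omega
      · rw [if_neg hvc]
        apply h1 v
        have hv' : v = c ∨ d.contains v = true := by simpa using hv
        rcases hv' with h | h
        · exact absurd h hvc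
        · exact h
    · intro v
      rw [PySem.Dict.getD_modify]
      by_cases hvc : v = c
      · subst hvc
        rw [if_pos rfl]
        cases hc : d.contains v with
        | false =>
          have hz := PySem.Dict.getD_of_not_contains d 0 hc
          rw [hz]
          simp only [Bool.cond_false]
          constructor
          · intro hv
            have := (h2 v).mp hv
            rw [hz] at this
            omega
          · intro hv; exact absurd hv (by omega)
        | true =>
          have h1c := h1 v hc
          rw [Bool.cond_true, PySem.Set.mem_add]
          constructor
          · intro _; omega
          · intro _; exact Or.inr rfl
      · rw [if_neg hvc]
        cases hc : d.contains c with
        | false => rw [Bool.cond_false]; exact h2 v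
        | true =>
          rw [Bool.cond_true, PySem.Set.mem_add]
          constructor
          · rintro (hv | hv)
            · exact (h2 v).mp hv
            · exact absurd hv hvc
          · intro hv; exact Or.inl ((h2 v).mpr hv)

-- characterise A's first loop from the empty start
theorem foldA_counter (cs : List Char) :
    (cs.foldl pvCountStepA (PySem.Dict.empty, PySem.Set.empty)).1 = PySem.Dict.counter cs
    ∧ ∀ v, v ∈ (cs.foldl pvCountStepA (PySem.Dict.empty, PySem.Set.empty)).2 ↔ 2 ≤ (cs.count v : Int) := by
  have h := foldA_spec cs PySem.Dict.empty PySem.Set.empty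
    (by intro v hv; rw [PySem.Dict.contains_empty] at hv; exact absurd hv (by simp))
    (by intro v
        constructor
        · intro hv; exact absurd hv (by simp [PySem.Set.empty])
        · intro hv; rw [PySem.Dict.getD_empty] at hv; exact absurd hv (by omega))
  refine ⟨h.1, fun v => ?_⟩
  rw [(h.2 v)]
  have : cs.foldl (fun d x => d.modify x 0 (· + 1)) PySem.Dict.empty = PySem.Dict.counter cs := rfl
  rw [this, PySem.Dict.getD_counter]

-- the aligned length-3 block [a,b,c] is uniform iff a=b and b=c
theorem tripleSet_len (a b c : Char) :
    (PySem.Set.len (PySem.Set.ofList [a, b, c]) == (1 : Int)) = (a == b && b == c) := by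
  by_cases hab : a = b <;> by_cases hbc : b = c
  · subst hab; subst hbc
    simp [PySem.Set.ofList, PySem.Set.add, PySem.Set.contains, PySem.Set.len, List.foldl]
  · subst hab
    have h1 : ¬ (c = a) := fun h => hbc h.symm
    simp [PySem.Set.ofList, PySem.Set.add, PySem.Set.contains, PySem.Set.len, List.foldl, hbc, h1]
  · subst hbc
    have h1 : ¬ (b = a) := fun h => hab h.symm
    simp [PySem.Set.ofList, PySem.Set.add, PySem.Set.contains, PySem.Set.len, List.foldl, hab, h1]
  · have h1 : ¬ (b = a) := fun h => hab h.symm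
    by_cases hac : a = c
    · subst hac
      simp [PySem.Set.ofList, PySem.Set.add, PySem.Set.contains, PySem.Set.len, List.foldl,
        hab, hbc]
    · have h2 : ¬ (c = a) := fun h => hac h.symm
      have h3 : ¬ (c = b) := fun h => hbc h.symm
      simp [PySem.Set.ofList, PySem.Set.add, PySem.Set.contains, PySem.Set.len, List.foldl,
        hab, hbc, h1, h2, h3]

-- range(0, n, 3) as a mapped List.range
theorem pyRange3 (n : Int) (hn : 0 ≤ n) :
    PySem.List.pyRange 0 n 3
      = (List.range ((n + 2) / 3).toNat).map (fun (k : Nat) => (3 : Int) * (k : Int)) := by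
  rw [PySem.List.pyRange_of_pos 0 n (by norm_num)]
  have hc : (if 0 < n then ((n - 0 + 3 - 1) / 3).toNat else 0) = ((n + 2) / 3).toNat := by
    split_ifs with h
    · congr 2; ring
    · have h0 : n = 0 := by omega
      subst h0; decide
  rw [hc]
  apply List.map_congr_left
  intro k _
  ring

-- shifting the scan past a full block of three
theorem blockScan_shift (a b c : Char) (t : List Char) :
    ∀ L : List Nat,
      pvBlockScanA (a :: b :: c :: t) (L.map (fun (k : Nat) => (3 : Int) + 3 * (k : Int)))
        = pvBlockScanA t (L.map (fun (k : Nat) => (3 : Int) * (k : Int))) := by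
  intro L
  induction L with
  | nil => rfl
  | cons k L ih =>
    simp only [List.map_cons, pvBlockScanA]
    have e1 : ((3 : Int) + 3 * (k : Int)) = ((3 + 3 * k : Nat) : Int) := by push_cast; ring
    have e2 : ((3 : Int) + 3 * (k : Int) + 3) = ((3 + 3 * k + 3 : Nat) : Int) := by push_cast; ring
    have e3 : ((3 : Int) * (k : Int)) = ((3 * k : Nat) : Int) := by push_cast; ring
    have e4 : ((3 : Int) * (k : Int) + 3) = ((3 * k + 3 : Nat) : Int) := by push_cast; ring
    have hs : PySem.List.slice (a :: b :: c :: t) (some ((3 : Int) + 3 * (k : Int)))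
        (some ((3 : Int) + 3 * (k : Int) + 3))
        = PySem.List.slice t (some ((3 : Int) * (k : Int))) (some ((3 : Int) * (k : Int) + 3)) := by
      rw [e2, e1, e4, e3, PySem.List.slice_natCast, PySem.List.slice_natCast]
      rw [show (3 + 3 * k + 3) - (3 + 3 * k) = 3 from by omega,
        show (3 * k + 3) - (3 * k) = 3 from by omega,
        show (3 + 3 * k) = 3 * k + 1 + 1 + 1 from by omega]
      simp only [List.drop_succ_cons]
    rw [hs, ih]

-- A's indexed slice scan equals B's three-at-a-time consumption
theorem blockScan_eq_chunk : ∀ cs : List Char,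
    pvBlockScanA cs (PySem.List.pyRange 0 (cs.length : Int) 3) = pvChunkScanB cs
  | [] => by decide
  | [a] => by
      rw [show (([a] : List Char).length : Int) = 1 by simp]
      rw [show PySem.List.pyRange 0 (1 : Int) 3 = [0] from by decide]
      have hs : PySem.List.slice ([a] : List Char) none (some (3 : Int)) = [a] := by
        rw [PySem.List.slice_to _ (by norm_num)]
        rfl
      simp [pvBlockScanA, hs, pvChunkScanB]
  | [a, b] => by
      rw [show (([a, b] : List Char).length : Int) = 2 by simp]
      rw [show PySem.List.pyRange 0 (2 : Int) 3 = [0] from by decide]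
      have hs : PySem.List.slice ([a, b] : List Char) none (some (3 : Int)) = [a, b] := by
        rw [PySem.List.slice_to _ (by norm_num)]
        rfl
      simp [pvBlockScanA, hs, pvChunkScanB]
  | a :: b :: c :: t => by
      have hlen : ((a :: b :: c :: t).length : Int) = (t.length : Int) + 3 := by
        rw [List.length_cons, List.length_cons, List.length_cons]
        push_cast
        ring
      rw [hlen, pyRange3 _ (by positivity)]
      have hdiv : (((t.length : Int) + 3 + 2) / 3).toNat
          = (((t.length : Int) + 2) / 3).toNat + 1 := by omega
      rw [hdiv, List.range_succ_eq_map, List.map_cons, List.map_map]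
      have hmaps : ((List.range (((t.length : Int) + 2) / 3).toNat).map
          ((fun (k : Nat) => (3 : Int) * (k : Int)) ∘ Nat.succ))
          = (List.range (((t.length : Int) + 2) / 3).toNat).map
              (fun (k : Nat) => (3 : Int) + 3 * (k : Int)) := by
        apply List.map_congr_left
        intro k _
        simp only [Function.comp_apply, Nat.succ_eq_add_one]
        push_cast
        ring
      rw [hmaps]
      simp only [pvBlockScanA]
      have hblk : PySem.List.slice (a :: b :: c :: t) (some ((3 : Int) * ((0 : Nat) : Int)))
          (some ((3 : Int) * ((0 : Nat) : Int) + 3)) = [a, b, c] := by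
        rw [show ((3 : Int) * ((0 : Nat) : Int)) = ((0 : Nat) : Int) by norm_num,
          show (((0 : Nat) : Int) + 3) = ((3 : Nat) : Int) by norm_num, PySem.List.slice_natCast]
        rfl
      rw [hblk]
      rw [show ((([a, b, c] : List Char).length : Int) == 3) = true from by norm_num]
      rw [Bool.and_true, tripleSet_len a b c]
      rw [blockScan_shift a b c t, ← pyRange3 _ (by positivity), blockScan_eq_chunk t]
      show (if (a == b && b == c) = true then false else pvChunkScanB t)
          = pvChunkScanB (a :: b :: c :: t)
      by_cases h : (a == b && b == c) = true <;> simp [pvChunkScanB, h]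
  termination_by cs => cs.length

-- B's count dictionary is Counter(s)
theorem foldB_counter (cs : List Char) :
    cs.foldl (fun (d : PySem.Dict Char Int) c => d.insert c (d.getD c 0 + 1)) PySem.Dict.empty
      = PySem.Dict.counter cs :=
  PySem.Dict.foldl_insert_getD_add_one_eq_counter cs

-- ===== VERDICT (by name: the statement is the Claim_ definition above) =====
theorem izenaceno_spec : Claim_equal_izenaceno := by
  intro s _
  unfold Spec_izenaceno izenaceno izenaceno_alt
  simp only [PySem.Str.len_eq, foldB_counter]
  rw [PySem.List.foldl_pyRange_zero_pyGetD' s.toList ' ' pvCountStepA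
    (PySem.Dict.empty, PySem.Set.empty)]
  obtain ⟨hd, hse⟩ := foldA_counter s.toList
  rw [hd, blockScan_eq_chunk]
  set cs := s.toList with hcs
  set D := PySem.Dict.counter cs with hD
  set SE := (cs.foldl pvCountStepA (PySem.Dict.empty, PySem.Set.empty)).2 with hSE
  have hxo : ∀ v : Char, D.getD v 0 = (cs.count v : Int) := fun v => PySem.Dict.getD_counter cs v
  have hEq : (PySem.Set.equal SE (PySem.Set.ofList ['x', 'o']) = true) ↔
      (∀ v : Char, 2 ≤ (cs.count v : Int) ↔ (v = 'x' ∨ v = 'o')) := by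
    rw [PySem.Set.equal_iff]
    constructor
    · intro h v; rw [← hse v]; simpa [PySem.Set.mem_ofList] using h v
    · intro h v; rw [hse v]; simpa [PySem.Set.mem_ofList] using h v
  have hany : ((D.items.any (fun p => !(p.1 == 'x' || p.1 == 'o') && decide (2 ≤ p.2))) = true)
      ↔ ∃ k ∈ cs, ¬(k = 'x' ∨ k = 'o') ∧ 2 ≤ (cs.count k : Int) := by
    rw [hD, PySem.Dict.items_counter]
    simp only [List.any_map, List.any_eq_true, Function.comp_apply, Bool.and_eq_true,
      Bool.not_eq_true', Bool.or_eq_false_iff, beq_eq_false_iff_ne, ne_eq,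
      decide_eq_true_eq]
    constructor
    · rintro ⟨k, hk, ⟨h1, h1'⟩, h2⟩
      exact ⟨k, (PySem.Set.mem_ofList _ _).mp hk, by tauto, h2⟩
    · rintro ⟨k, hk, h1, h2⟩
      exact ⟨k, (PySem.Set.mem_ofList _ _).mpr hk, by tauto, h2⟩
  by_cases hP : ∀ v : Char, 2 ≤ (cs.count v : Int) ↔ (v = 'x' ∨ v = 'o')
  · have h1 : PySem.Set.equal SE (PySem.Set.ofList ['x', 'o']) = true := hEq.mpr hP
    have h2x : (2 : Int) ≤ (cs.count 'x' : Int) := (hP 'x').mpr (Or.inl rfl)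
    have hlt : decide (D.getD 'x' 0 < 2) = false := by
      rw [hxo 'x']
      simp only [decide_eq_false_iff_not, not_lt]
      omega
    have hanyf : (D.items.any (fun p => !(p.1 == 'x' || p.1 == 'o') && decide (2 ≤ p.2)))
        = false := by
      rw [← Bool.not_eq_true, hany]
      rintro ⟨k, hk, hk1, hk2⟩
      exact hk1 ((hP k).mp hk2)
    rw [h1, hlt, hanyf]
    cases hne : (D.getD 'x' 0 != D.getD 'o' 0) <;> simp
  · have h1 : PySem.Set.equal SE (PySem.Set.ofList ['x', 'o']) = false := by
      cases h : PySem.Set.equal SE (PySem.Set.ofList ['x', 'o']) with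
      | false => rfl
      | true => exact absurd (hEq.mp h) hP
    rw [h1]
    simp only [Bool.not_false, Bool.true_or, if_true]
    by_cases hc1 : (decide (D.getD 'x' 0 < 2) || (D.getD 'x' 0 != D.getD 'o' 0)) = true
    · rw [if_pos hc1]
    · simp only [Bool.not_eq_true, Bool.or_eq_false_iff, decide_eq_false_iff_not, not_lt,
        bne_eq_false_iff_eq] at hc1
      obtain ⟨hge, hxe⟩ := hc1
      rw [hxo 'x'] at hge hxe
      rw [hxo 'o'] at hxe
      have hc2 : (D.items.any (fun p => !(p.1 == 'x' || p.1 == 'o') && decide (2 ≤ p.2)))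
          = true := by
        apply hany.mpr
        rcases not_forall.mp hP with ⟨v, hv⟩
        rw [iff_iff_implies_and_implies, not_and_or] at hv
        rcases hv with hv | hv
        · push Not at hv
          obtain ⟨h2v, hvo⟩ := hv
          refine ⟨v, ?_, not_or.mpr hvo, h2v⟩
          rw [← List.count_pos_iff]
          omega
        · push Not at hv
          obtain ⟨hvo, h2v⟩ := hv
          rcases hvo with rfl | rfl
          · omega
          · omega
      have hc1f : (decide (D.getD 'x' 0 < 2) || (D.getD 'x' 0 != D.getD 'o' 0)) = false := by
        simp only [Bool.or_eq_false_iff, decide_eq_false_iff_not, not_lt, bne_eq_false_iff_eq]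
        rw [hxo 'x', hxo 'o']
        exact ⟨by omega, by omega⟩
      rw [hc1f, hc2]
      simp
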